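-- pv_equiv track=rewrite | github.com/pattycakelol/CS_160_Project | log_processingv3.py | count_info_by_type
-- ===== SOURCE A (Python) =====
-- def count_info_by_type(proc_dict):
--     dockerservercontroller = 0
--     volume = 0
--     provision = 0
--     blueprint = 0
--     handler = 0
--     for proc in proc_dict:
--         if 'dockerservercontroller' in proc.lower():
--             dockerservercontroller = dockerservercontroller + 1
--         if 'volume' in proc.lower():
--             volume = volume + 1
--         if 'provision' in proc.lower():
--             provision = provision + 1
--         if 'blueprint' in proc.lower():
--             blueprint = blueprint + 1
--         if 'handler' in proc.lower():
--             handler = handler + 1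
--     return [dockerservercontroller, volume, provision, blueprint, handler]
-- ===== SOURCE B (Python) =====
-- def count_info_by_type(proc_dict):
--     lowered = [proc.lower() for proc in proc_dict]
--     subs = ['dockerservercontroller', 'volume', 'provision', 'blueprint', 'handler']
--     return [sum(1 for p in lowered if s in p) for s in subs]
-- ===== Notes on version B (the rewrite author's own statement) =====
-- stated objective: simpler
-- what changed: Replaces the five hand-maintained counters updated in one pass per key by lowering the keys once and then, per substring, counting matching keys with a comprehension (outer loop over the five substrings instead of over the items).
import Mathlib
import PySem

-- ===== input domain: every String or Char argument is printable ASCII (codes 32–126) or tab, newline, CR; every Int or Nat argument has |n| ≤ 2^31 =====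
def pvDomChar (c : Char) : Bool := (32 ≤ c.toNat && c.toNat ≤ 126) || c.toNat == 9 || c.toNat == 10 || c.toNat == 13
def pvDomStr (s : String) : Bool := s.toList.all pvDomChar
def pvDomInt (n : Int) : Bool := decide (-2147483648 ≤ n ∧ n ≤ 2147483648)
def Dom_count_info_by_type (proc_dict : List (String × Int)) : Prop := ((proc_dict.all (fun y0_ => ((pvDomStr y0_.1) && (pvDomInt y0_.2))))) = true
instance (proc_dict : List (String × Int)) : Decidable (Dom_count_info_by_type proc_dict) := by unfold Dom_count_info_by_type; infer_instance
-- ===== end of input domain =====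

-- B lowers each key once and counts, per substring, the keys containing it (loop over five substrings instead of five counters per item); objective: simpler.


-- ===== PORT A =====
def count_info_by_type (proc_dict : List (String × Int)) : List Int :=
  let st :=
    proc_dict.foldl
      (fun (st : Int × Int × Int × Int × Int) proc =>
        let (d, v, p, b, h) := st
        let d := if PySem.Str.isIn "dockerservercontroller" (PySem.Str.lower proc.1) then d + 1 else d
        let v := if PySem.Str.isIn "volume" (PySem.Str.lower proc.1) then v + 1 else v
        let p := if PySem.Str.isIn "provision" (PySem.Str.lower proc.1) then p + 1 else p
        let b := if PySem.Str.isIn "blueprint" (PySem.Str.lower proc.1) then b + 1 else b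
        let h := if PySem.Str.isIn "handler" (PySem.Str.lower proc.1) then h + 1 else h
        (d, v, p, b, h))
      (0, 0, 0, 0, 0)
  [st.1, st.2.1, st.2.2.1, st.2.2.2.1, st.2.2.2.2]

-- ===== PORT B =====
def count_info_by_type_alt (proc_dict : List (String × Int)) : List Int :=
  let lowered := proc_dict.map (fun proc => PySem.Str.lower proc.1)
  let subs : List String := ["dockerservercontroller", "volume", "provision", "blueprint", "handler"]
  subs.map (fun s => ((lowered.countP (fun p => PySem.Str.isIn s p)) : Int))

-- ===== PRECONDITION & SPEC =====
def Spec_count_info_by_type (proc_dict : List (String × Int)) (out : List Int) : Prop := out = count_info_by_type_alt proc_dict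
instance (proc_dict : List (String × Int)) (out : List Int) : Decidable (Spec_count_info_by_type proc_dict out) := by unfold Spec_count_info_by_type; infer_instance

-- ===== CLAIM (what is proved, stated in full; the proofs are below) =====
def Claim_equal_count_info_by_type : Prop := ∀ (proc_dict : List (String × Int)), Dom_count_info_by_type proc_dict → Spec_count_info_by_type proc_dict (count_info_by_type proc_dict)

-- ===== LEMMAS AND PROOFS =====

-- per-substring count of keys (after lowering) containing s
def pvCnt (s : String) (l : List (String × Int)) : Int :=
  ((l.countP (fun pr => PySem.Str.isIn s (PySem.Str.lower pr.1))) : Int)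

theorem pvCnt_nil (s : String) : pvCnt s [] = 0 := rfl

theorem pvCnt_cons (s : String) (x : String × Int) (l : List (String × Int)) :
    pvCnt s (x :: l) =
      (if PySem.Str.isIn s (PySem.Str.lower x.1) then 1 else 0) + pvCnt s l := by
  simp only [pvCnt, List.countP_cons]
  split_ifs <;> push_cast <;> omega

theorem foldA_eq (l : List (String × Int)) (d v p b h : Int) :
    l.foldl
      (fun (st : Int × Int × Int × Int × Int) proc =>
        let (d, v, p, b, h) := st
        let d := if PySem.Str.isIn "dockerservercontroller" (PySem.Str.lower proc.1) then d + 1 else d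
        let v := if PySem.Str.isIn "volume" (PySem.Str.lower proc.1) then v + 1 else v
        let p := if PySem.Str.isIn "provision" (PySem.Str.lower proc.1) then p + 1 else p
        let b := if PySem.Str.isIn "blueprint" (PySem.Str.lower proc.1) then b + 1 else b
        let h := if PySem.Str.isIn "handler" (PySem.Str.lower proc.1) then h + 1 else h
        (d, v, p, b, h))
      (d, v, p, b, h) =
      (d + pvCnt "dockerservercontroller" l,
       v + pvCnt "volume" l,
       p + pvCnt "provision" l,
       b + pvCnt "blueprint" l,
       h + pvCnt "handler" l) := by
  induction l generalizing d v p b h with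
  | nil => simp [pvCnt_nil]
  | cons x t ih =>
      simp only [List.foldl_cons, ih, pvCnt_cons]
      split_ifs <;> simp <;> omega

theorem count_info_by_type_spec : Claim_equal_count_info_by_type := by
  intro l _
  show count_info_by_type l = count_info_by_type_alt l
  simp only [count_info_by_type, count_info_by_type_alt, foldA_eq, List.map_cons,
    List.map_nil, List.countP_map]
  simp [pvCnt, Function.comp_def, PySem.Str.lower]
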